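-- pv_equiv track=rewrite | github.com/sangtaekim12/soulzz | enhanced_rag.py | format_final_answer
-- ===== SOURCE A (Python) =====
-- def format_final_answer(answer_parts):
--     """최종 답변을 문단 구분과 함께 포맷"""
--     if not answer_parts:
--         return ""
--
--     # 최대 5개 문장으로 제한하여 간결성 유지
--     limited_parts = answer_parts[:5]
--
--     formatted_paragraphs = []
--     current_paragraph = []
--
--     for i, sentence in enumerate(limited_parts):
--         # 각 문장이 마침표로 끝나는지 확인
--         if not sentence.rstrip().endswith(('.', '!', '?')):
--             sentence = sentence.rstrip() + '.'
--
--         current_paragraph.append(sentence)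
--
--         # 2개 문장마다 문단 구분 또는 마지막 문장
--         if len(current_paragraph) >= 2 or i == len(limited_parts) - 1:
--             if current_paragraph:
--                 # 문단 내 문장들을 한 줄로 연결
--                 paragraph_text = ' '.join(current_paragraph)
--                 formatted_paragraphs.append(paragraph_text)
--                 current_paragraph = []
--
--     # 문단들을 줄바꿈으로 구분하여 결합
--     final_answer = '\n\n'.join(formatted_paragraphs)
--
--     # 길이 제한 (너무 긴 경우 첫 번째 문단만 사용)
--     if len(final_answer) > 400 and len(formatted_paragraphs) > 1:
--         final_answer = formatted_paragraphs[0]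
--         if not final_answer.endswith('.'):
--             final_answer += '.'
--
--     return final_answer
-- ===== SOURCE B (Python) =====
-- def format_final_answer(answer_parts):
--     if not answer_parts:
--         return ""
--     parts = [p if p.rstrip().endswith(('.', '!', '?')) else p.rstrip() + '.'
--              for p in answer_parts[:5]]
--     paragraphs = [' '.join(parts[i:i + 2]) for i in range(0, len(parts), 2)]
--     final_answer = '\n\n'.join(paragraphs)
--     if len(final_answer) > 400 and len(paragraphs) > 1:
--         p0 = paragraphs[0]
--         final_answer = p0 if p0.endswith('.') else p0 + '.'
--     return final_answer
-- ===== Notes on version B (the rewrite author's own statement) =====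
-- stated objective: alternative
-- what changed: Replaces A's stateful running-accumulator loop (current_paragraph with a '>=2 or last index' flush) by a two-pass decomposition: normalize all sentences first, then build paragraphs by joining stride-2 slices parts[i:i+2] for i in range(0, len, 2); identical length cap.
import Mathlib
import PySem

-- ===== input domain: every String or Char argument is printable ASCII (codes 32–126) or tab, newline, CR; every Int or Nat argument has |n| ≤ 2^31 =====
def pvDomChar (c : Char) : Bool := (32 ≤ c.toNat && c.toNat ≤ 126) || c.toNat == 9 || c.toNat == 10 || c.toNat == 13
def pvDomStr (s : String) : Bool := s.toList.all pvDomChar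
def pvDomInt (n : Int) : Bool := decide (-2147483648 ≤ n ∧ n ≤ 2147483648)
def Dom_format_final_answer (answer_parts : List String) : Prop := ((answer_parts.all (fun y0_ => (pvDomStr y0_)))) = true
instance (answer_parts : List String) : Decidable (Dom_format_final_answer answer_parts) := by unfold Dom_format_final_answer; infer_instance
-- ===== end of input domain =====

-- B replaces A's running-accumulator flush loop by a normalize-then-stride-slice decomposition; same values, objective: alternative/simpler.

-- ===== PORT A =====
-- the two normalization lines at the top of A's loop body
def aNormalize (sentence : String) : String :=
  if !(PySem.Str.endswith (PySem.Str.rstrip sentence) "." ||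
       PySem.Str.endswith (PySem.Str.rstrip sentence) "!" ||
       PySem.Str.endswith (PySem.Str.rstrip sentence) "?")
  then PySem.Str.rstrip sentence ++ "." else sentence

-- one iteration of A's for-loop: state = (formatted_paragraphs, current_paragraph)
def aStep (total : Int) (st : List String × List String) (p : Int × String) :
    List String × List String :=
  let sentence := aNormalize p.2
  let cur := st.2 ++ [sentence]
  if cur.length ≥ 2 || p.1 == total - 1 then
    if cur ≠ [] then (st.1 ++ [PySem.Str.join " " cur], []) else (st.1, cur)
  else (st.1, cur)

def format_final_answer (answer_parts : List String) : String :=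
  if answer_parts = [] then ""
  else
    let limited := PySem.List.slice answer_parts none (some 5)
    let paragraphs :=
      ((PySem.List.enumerate limited).foldl (aStep (limited.length : Int)) ([], [])).1
    let fin := PySem.Str.join "\n\n" paragraphs
    if PySem.Str.len fin > 400 && paragraphs.length > 1 then
      let fin := PySem.List.pyGetD paragraphs 0 ""
      if !(PySem.Str.endswith fin ".") then fin ++ "." else fin
    else fin

-- ===== PORT B =====
-- the conditional expression inside B's first comprehension
def bNormalize (p : String) : String :=
  if PySem.Str.endswith (PySem.Str.rstrip p) "." ||
     PySem.Str.endswith (PySem.Str.rstrip p) "!" ||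
     PySem.Str.endswith (PySem.Str.rstrip p) "?"
  then p else PySem.Str.rstrip p ++ "."

-- B's second comprehension: ' '.join(parts[i:i+2]) for i in range(0, len(parts), 2)
def bParagraphs (parts : List String) : List String :=
  (PySem.List.pyRange 0 (parts.length : Int) 2).map
    (fun i => PySem.Str.join " " (PySem.List.slice parts (some i) (some (i + 2))))

def format_final_answer_alt (answer_parts : List String) : String :=
  if answer_parts = [] then ""
  else
    let parts := (PySem.List.slice answer_parts none (some 5)).map bNormalize
    let paragraphs := bParagraphs parts
    let fin := PySem.Str.join "\n\n" paragraphs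
    if PySem.Str.len fin > 400 && paragraphs.length > 1 then
      let p0 := PySem.List.pyGetD paragraphs 0 ""
      if PySem.Str.endswith p0 "." then p0 else p0 ++ "."
    else fin

-- ===== PRECONDITION & SPEC =====
def Spec_format_final_answer (answer_parts : List String) (out : String) : Prop := out = format_final_answer_alt answer_parts
instance (answer_parts : List String) (out : String) : Decidable (Spec_format_final_answer answer_parts out) := by unfold Spec_format_final_answer; infer_instance

-- ===== CLAIM (what is proved, stated in full; the proofs are below) =====
def Claim_equal_format_final_answer : Prop := ∀ (answer_parts : List String), Dom_format_final_answer answer_parts → Spec_format_final_answer answer_parts (format_final_answer answer_parts)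

-- ===== LEMMAS AND PROOFS =====
theorem aNormalize_eq_bNormalize (s : String) : aNormalize s = bNormalize s := by
  unfold aNormalize bNormalize
  cases h : (PySem.Str.endswith (PySem.Str.rstrip s) "." ||
       PySem.Str.endswith (PySem.Str.rstrip s) "!" ||
       PySem.Str.endswith (PySem.Str.rstrip s) "?") <;> simp [h]

-- A's flush loop agrees with B's stride-2 slicing on every list of at most 5 sentences
theorem paragraphs_eq (l : List String) (h : l.length ≤ 5) :
    ((PySem.List.enumerate l).foldl (aStep (l.length : Int)) ([], [])).1
      = bParagraphs (l.map bNormalize) := by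
  match l with
  | [] =>
      simp only [PySem.List.enumerate_nil, List.foldl_nil, List.map_nil, bParagraphs]
      decide
  | [a] =>
      simp [PySem.List.enumerate_cons, PySem.List.enumerate_nil, aStep, bParagraphs,
        aNormalize_eq_bNormalize,
        (by decide : PySem.List.pyRange 0 (1:Int) 2 = [0]),
        PySem.List.slice_toNat]
  | [a, b] =>
      simp [PySem.List.enumerate_cons, PySem.List.enumerate_nil, aStep, bParagraphs,
        aNormalize_eq_bNormalize,
        (by decide : PySem.List.pyRange 0 (2:Int) 2 = [0]),
        PySem.List.slice_toNat]
  | [a, b, c] =>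
      simp [PySem.List.enumerate_cons, PySem.List.enumerate_nil, aStep, bParagraphs,
        aNormalize_eq_bNormalize,
        (by decide : PySem.List.pyRange 0 (3:Int) 2 = [0, 2]),
        PySem.List.slice_toNat]
  | [a, b, c, d] =>
      simp [PySem.List.enumerate_cons, PySem.List.enumerate_nil, aStep, bParagraphs,
        aNormalize_eq_bNormalize,
        (by decide : PySem.List.pyRange 0 (4:Int) 2 = [0, 2]),
        PySem.List.slice_toNat]
  | [a, b, c, d, e] =>
      simp [PySem.List.enumerate_cons, PySem.List.enumerate_nil, aStep, bParagraphs,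
        aNormalize_eq_bNormalize,
        (by decide : PySem.List.pyRange 0 (5:Int) 2 = [0, 2, 4]),
        PySem.List.slice_toNat]
  | a :: b :: c :: d :: e :: f :: rest =>
      simp at h; omega

-- ===== VERDICT (by name: the statement is the Claim_ definition above) =====
theorem format_final_answer_spec : Claim_equal_format_final_answer := by
  intro answer_parts _
  unfold Spec_format_final_answer format_final_answer format_final_answer_alt
  by_cases hnil : answer_parts = []
  · simp [hnil]
  · simp only [if_neg hnil]
    rw [paragraphs_eq _ (by
      rw [PySem.List.slice_to answer_parts (show (0:Int) ≤ 5 by norm_num)]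
      simp)]
    cases hend : PySem.Str.endswith
        (PySem.List.pyGetD (bParagraphs ((PySem.List.slice answer_parts none (some 5)).map bNormalize)) 0 "") "." <;>
      simp
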